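-- pv_equiv track=rewrite | github.com/ssb22/midi-beeper | midi-beeper.py | playLen
-- ===== SOURCE A (Python) =====
-- def playLen(secondNoterestByte): # for gate-byte sync
--     if type(secondNoterestByte)==str:
--         secondNoterestByte = ord(secondNoterestByte)
--     numDots = (secondNoterestByte >> 3) & 3
--     secondNoterestByte = int(secondNoterestByte/32)
--     l = 8 # so can *=1.5 3 times and still have an integer
--     for i in range(secondNoterestByte,7): l *= 2
--     dotVal = int(l/2)
--     for i in range(numDots):
--       l += dotVal ; dotVal = int(dotVal/2)
--     return l
-- ===== SOURCE B (Python) =====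
-- def playLen(secondNoterestByte): # for gate-byte sync
--     if type(secondNoterestByte)==str:
--         secondNoterestByte = ord(secondNoterestByte)
--     numDots = (secondNoterestByte >> 3) & 3
--     s = int(secondNoterestByte/32)
--     l = 8 * 2 ** max(7 - s, 0)
--     # l + l/2 + l/4 + ... (numDots extra terms) in closed form; exact since 8 | l
--     return l * (2 ** (numDots + 1) - 1) // 2 ** numDots
-- ===== Notes on version B (the rewrite author's own statement) =====
-- stated objective: simpler
-- what changed: Replaced A's doubling loop and dotted-note accumulation loop with a single closed-form expression: l = 8 * 2**max(7-s,0) and result = l*(2**(numDots+1)-1) // 2**numDots (exact since 8 divides l).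
import Mathlib
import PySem

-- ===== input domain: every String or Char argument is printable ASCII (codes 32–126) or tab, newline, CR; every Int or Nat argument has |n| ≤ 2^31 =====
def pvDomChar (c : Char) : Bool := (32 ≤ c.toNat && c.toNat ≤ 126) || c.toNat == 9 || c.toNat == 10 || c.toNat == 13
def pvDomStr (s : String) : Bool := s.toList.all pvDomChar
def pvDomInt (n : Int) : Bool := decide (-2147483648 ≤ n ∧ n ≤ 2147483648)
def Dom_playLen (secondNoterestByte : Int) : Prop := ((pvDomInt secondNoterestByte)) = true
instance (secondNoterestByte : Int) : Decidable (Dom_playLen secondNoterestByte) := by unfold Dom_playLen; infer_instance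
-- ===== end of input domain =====

-- B replaces A's two loops (repeated doubling, then repeated dotted halving/adding) by one
-- closed-form arithmetic expression; objective: simpler.

-- ===== PORT A =====
-- The 'type(secondNoterestByte)==str' branch is vacuous here: the argument is an Int.
-- int(x/32) and int(l/2): on every admitted input these float divisions are exact
-- (|x| ≤ 2^31 < 2^53; l is a power of two below 2^1024 inside Pre_), so int(·) is
-- truncation toward zero of an exact quotient = Int.tdiv.
def playLen (secondNoterestByte : Int) : Int :=
  let numDots : Int := PySem.Int.band (secondNoterestByte >>> (3 : Nat)) 3
  let s : Int := Int.tdiv secondNoterestByte 32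
  let l : Int := (PySem.List.pyRange s 7 1).foldl (fun l _ => l * 2) 8
  let dotVal : Int := Int.tdiv l 2
  let p : Int × Int :=
    (PySem.List.pyRange 0 numDots 1).foldl
      (fun (p : Int × Int) _ => (p.1 + p.2, Int.tdiv p.2 2)) (l, dotVal)
  p.1

-- ===== PORT B =====
-- numDots ∈ [0,3] and max (7-s) 0 ≥ 0, so the .toNat exponents are Python's exact '**'.
def playLen_alt (secondNoterestByte : Int) : Int :=
  let numDots : Int := PySem.Int.band (secondNoterestByte >>> (3 : Nat)) 3
  let s : Int := Int.tdiv secondNoterestByte 32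
  let l : Int := 8 * 2 ^ (max (7 - s) 0).toNat
  PySem.Int.floordiv (l * (2 ^ (numDots + 1).toNat - 1)) (2 ^ numDots.toNat)

-- ===== PRECONDITION & SPEC =====
-- Pre_ excludes exactly the inputs where A raises OverflowError: for n ≤ -32480
-- (i.e. int(n/32) ≤ -1015) the value l/2 exceeds the float range in 'dotVal = int(l/2)'.
def Pre_playLen (secondNoterestByte : Int) : Prop := -32480 < secondNoterestByte
instance (secondNoterestByte : Int) : Decidable (Pre_playLen secondNoterestByte) := by
  unfold Pre_playLen; infer_instance

def pvWitness_playLen : Int := 24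

def Spec_playLen (secondNoterestByte : Int) (out : Int) : Prop := out = playLen_alt secondNoterestByte
instance (secondNoterestByte : Int) (out : Int) : Decidable (Spec_playLen secondNoterestByte out) := by unfold Spec_playLen; infer_instance

-- ===== CLAIM (what is proved, stated in full; the proofs are below) =====
def Claim_equal_playLen : Prop := ∀ (secondNoterestByte : Int), Dom_playLen secondNoterestByte → Pre_playLen secondNoterestByte → Spec_playLen secondNoterestByte (playLen secondNoterestByte)

-- ===== LEMMAS AND PROOFS =====

-- folding (·*2) over any list multiplies by 2^length
theorem pv_foldl_double (L : List Int) (a : Int) :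
    L.foldl (fun l _ => l * 2) a = a * 2 ^ L.length := by
  induction L generalizing a with
  | nil => simp
  | cons x xs ih => simp [List.foldl, ih (a * 2)]; ring

theorem pv_band3_bounds (x : Int) :
    0 ≤ PySem.Int.band x 3 ∧ PySem.Int.band x 3 < 4 := by
  unfold PySem.Int.band
  split_ifs with h1 h2 h2
  · have : x.toNat &&& (3 : Int).toNat < 2 ^ 2 :=
      Nat.and_lt_two_pow _ (by decide)
    constructor <;> [positivity; exact_mod_cast this]
  · omega
  · have : (3 : Int).toNat - ((3 : Int).toNat &&& (-x - 1).toNat) ≤ 3 := by omega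
    constructor <;> [positivity; exact_mod_cast Nat.lt_succ_of_le this]
  · omega

theorem playLen_eq_alt (n : Int) : playLen n = playLen_alt n := by
  unfold playLen playLen_alt
  dsimp only
  obtain ⟨hd0, hd1⟩ := pv_band3_bounds (n >>> (3 : Nat))
  set d := PySem.Int.band (n >>> (3 : Nat)) 3 with hdd
  clear_value d
  set s := Int.tdiv n 32 with hs
  clear_value s
  have hlen : (PySem.List.pyRange s 7 1).length = (max (7 - s) 0).toNat := by
    rw [PySem.List.length_pyRange_one]; omega
  rw [pv_foldl_double, hlen]
  generalize (max (7 - s) 0).toNat = K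
  generalize (2 : Int) ^ K = m
  have t1 : Int.tdiv (8 * m) 2 = 4 * m := by
    rw [show (8 : Int) * m = 2 * (4 * m) by ring, Int.mul_tdiv_cancel_left _ (by norm_num)]
  have t2 : Int.tdiv (4 * m) 2 = 2 * m := by
    rw [show (4 : Int) * m = 2 * (2 * m) by ring, Int.mul_tdiv_cancel_left _ (by norm_num)]
  have t3 : Int.tdiv (2 * m) 2 = m :=
    Int.mul_tdiv_cancel_left _ (by norm_num)
  have e1 : (8 * m * 3) / 2 = 12 * m := by
    rw [show (8 : Int) * m * 3 = 2 * (12 * m) by ring, Int.mul_ediv_cancel_left _ (by norm_num)]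
  have e2 : (8 * m * 7) / 4 = 14 * m := by
    rw [show (8 : Int) * m * 7 = 4 * (14 * m) by ring, Int.mul_ediv_cancel_left _ (by norm_num)]
  have e3 : (8 * m * 15) / 8 = 15 * m := by
    rw [show (8 : Int) * m * 15 = 8 * (15 * m) by ring, Int.mul_ediv_cancel_left _ (by norm_num)]
  interval_cases d <;>
    simp [PySem.List.pyRange, List.range_succ, List.foldl, t1, t2, t3, e1, e2, e3] <;>
    ring

-- ===== VERDICT (by name: the statement is the Claim_ definition above) =====
theorem playLen_spec : Claim_equal_playLen := by
  intro n _ _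
  unfold Spec_playLen
  exact playLen_eq_alt n
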